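-- pv_equiv track=rewrite | github.com/fantasiiio/GPT-Games | Blokus Duo/test.py | transform_point
-- ===== SOURCE A (Python) =====
-- def transform_point(point, rows, cols, orientation, mirror):
--     x, y = point
--     new_x, new_y = x, y
--     for _ in range(orientation):
--         new_x, new_y = y, rows - 1 - x
--         x, y = new_x, new_y
--     if mirror:
--         new_x = cols - 1 - x
--     return new_x, new_y
-- ===== SOURCE B (Python) =====
-- def transform_point(point, rows, cols, orientation, mirror):
--     x, y = point
--     k = max(orientation, 0) % 4
--     if k == 0:
--         rx, ry = x, y
--     elif k == 1:
--         rx, ry = y, rows - 1 - x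
--     elif k == 2:
--         rx, ry = rows - 1 - x, rows - 1 - y
--     else:
--         rx, ry = rows - 1 - y, x
--     if mirror:
--         rx = cols - 1 - rx
--     return rx, ry
-- ===== Notes on version B (the rewrite author's own statement) =====
-- stated objective: simpler
-- what changed: Replaces the per-step rotation loop (orientation iterations) with a constant-time closed form selecting among the four rotations by max(orientation,0) % 4, then mirroring.
import Mathlib
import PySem

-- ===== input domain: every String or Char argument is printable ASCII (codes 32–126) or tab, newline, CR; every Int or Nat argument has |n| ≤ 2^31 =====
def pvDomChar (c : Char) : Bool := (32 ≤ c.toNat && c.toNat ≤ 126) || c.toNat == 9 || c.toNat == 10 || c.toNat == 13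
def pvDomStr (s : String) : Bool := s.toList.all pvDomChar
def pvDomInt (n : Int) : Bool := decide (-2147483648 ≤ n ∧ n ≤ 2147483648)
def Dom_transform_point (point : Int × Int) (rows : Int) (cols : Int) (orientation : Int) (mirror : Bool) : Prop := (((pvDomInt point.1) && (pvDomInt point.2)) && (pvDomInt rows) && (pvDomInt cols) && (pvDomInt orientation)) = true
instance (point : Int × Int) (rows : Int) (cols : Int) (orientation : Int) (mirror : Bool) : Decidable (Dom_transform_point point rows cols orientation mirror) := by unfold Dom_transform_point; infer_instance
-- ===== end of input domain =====

-- B replaces A's per-step rotation loop with a constant-time closed form chosen by max(orientation,0) % 4 (simpler and O(1)).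


-- ===== PORT A =====
-- A's loop: for _ in range(orientation): x, y = y, rows - 1 - x  (range(orientation) runs orientation.toNat times)
def tpLoopA (rows : Int) : Nat → (Int × Int) → (Int × Int)
  | 0, p => p
  | n + 1, (x, y) => tpLoopA rows n (y, rows - 1 - x)

def transform_point (point : Int × Int) (rows : Int) (cols : Int) (orientation : Int) (mirror : Bool) : Int × Int :=
  let p := tpLoopA rows orientation.toNat point
  if mirror then (cols - 1 - p.1, p.2) else p

-- ===== PORT B =====
def transform_point_alt (point : Int × Int) (rows : Int) (cols : Int) (orientation : Int) (mirror : Bool) : Int × Int :=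
  let k : Int := (max orientation 0) % 4
  let r :=
    if k = 0 then point
    else if k = 1 then (point.2, rows - 1 - point.1)
    else if k = 2 then (rows - 1 - point.1, rows - 1 - point.2)
    else (rows - 1 - point.2, point.1)
  if mirror then (cols - 1 - r.1, r.2) else r

-- ===== PRECONDITION & SPEC =====
def Spec_transform_point (point : Int × Int) (rows : Int) (cols : Int) (orientation : Int) (mirror : Bool) (out : Int × Int) : Prop := out = transform_point_alt point rows cols orientation mirror
instance (point : Int × Int) (rows : Int) (cols : Int) (orientation : Int) (mirror : Bool) (out : Int × Int) : Decidable (Spec_transform_point point rows cols orientation mirror out) := by unfold Spec_transform_point; infer_instance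

-- ===== CLAIM (what is proved, stated in full; the proofs are below) =====
def Claim_equal_transform_point : Prop := ∀ (point : Int × Int) (rows : Int) (cols : Int) (orientation : Int) (mirror : Bool), Dom_transform_point point rows cols orientation mirror → Spec_transform_point point rows cols orientation mirror (transform_point point rows cols orientation mirror)

-- ===== LEMMAS AND PROOFS =====
theorem tpLoopA_add4 (rows : Int) (n : Nat) (x y : Int) :
    tpLoopA rows (n + 4) (x, y) = tpLoopA rows n (x, y) := by
  show tpLoopA rows (n + 1 + 1 + 1 + 1) (x, y) = _
  simp only [tpLoopA]
  norm_num

theorem tpLoopA_mod (rows : Int) (n : Nat) (x y : Int) :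
    tpLoopA rows n (x, y) = tpLoopA rows (n % 4) (x, y) := by
  induction n using Nat.strong_induction_on with
  | _ n ih =>
    by_cases h : n < 4
    · rw [Nat.mod_eq_of_lt h]
    · have e : n - 4 + 4 = n := by omega
      rw [← e, tpLoopA_add4, ih (n - 4) (by omega)]
      congr 1
      omega

theorem transform_point_spec : Claim_equal_transform_point := by
  intro ⟨x, y⟩ rows cols orientation mirror _
  unfold Spec_transform_point transform_point transform_point_alt
  have hk : (max orientation 0) % 4 = ((orientation.toNat % 4 : Nat) : Int) := by omega
  rw [tpLoopA_mod, hk]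
  have h4 : orientation.toNat % 4 = 0 ∨ orientation.toNat % 4 = 1 ∨
      orientation.toNat % 4 = 2 ∨ orientation.toNat % 4 = 3 := by omega
  rcases h4 with h | h | h | h <;> rw [h] <;> simp [tpLoopA]
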